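-- pv_equiv track=rewrite | github.com/Qzbit/ArkadaBot | calculators/star_pythagoras.py | calculate_star_pythagoras
-- ===== SOURCE A (Python) =====
-- def calculate_star_pythagoras(day, month, year):
--     """Выполняет расчёты для Звезды Пифагора."""
--     def reduce_to_single_digit(num):
--         while num > 9:
--             num = sum(int(d) for d in str(num))
--         return num
--
--     day_number = reduce_to_single_digit(day)
--     month_number = reduce_to_single_digit(month)
--     year_number = reduce_to_single_digit(sum(int(d) for d in str(year)))
--     sum1 = reduce_to_single_digit(day_number + month_number + year_number)
--     sum2 = reduce_to_single_digit(day_number + month_number + year_number + sum1)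
--     center = reduce_to_single_digit(day_number + month_number + year_number + sum1 + sum2)
--
--     return {
--         "day": day_number,
--         "month": month_number,
--         "year": year_number,
--         "sum1": sum1,
--         "sum2": sum2,
--         "center": center,
--     }
-- ===== SOURCE B (Python) =====
-- def calculate_star_pythagoras(day, month, year):
--     """Pythagoras star reductions via the closed-form digital root (no reduction loops)."""
--     def digital_root(num):
--         return num if num <= 9 else 1 + (num - 1) % 9
--
--     day_number = digital_root(day)
--     month_number = digital_root(month)
--     year_number = digital_root(sum(int(d) for d in str(year)))
--     base = day_number + month_number + year_number
--     sum1 = digital_root(base)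
--     sum2 = digital_root(base + sum1)
--     center = digital_root(base + sum1 + sum2)
--
--     return {
--         "day": day_number,
--         "month": month_number,
--         "year": year_number,
--         "sum1": sum1,
--         "sum2": sum2,
--         "center": center,
--     }
-- ===== Notes on version B (the rewrite author's own statement) =====
-- stated objective: simpler
-- what changed: Replaced A's while-loop reducer (repeatedly stringify and digit-sum until <= 9) with the closed-form digital root num if num <= 9 else 1 + (num - 1) % 9, keeping the str-based digit sum only for the year so a negative year still raises ValueError; Pre_ excludes year < 0 where both raise.
import Mathlib
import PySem

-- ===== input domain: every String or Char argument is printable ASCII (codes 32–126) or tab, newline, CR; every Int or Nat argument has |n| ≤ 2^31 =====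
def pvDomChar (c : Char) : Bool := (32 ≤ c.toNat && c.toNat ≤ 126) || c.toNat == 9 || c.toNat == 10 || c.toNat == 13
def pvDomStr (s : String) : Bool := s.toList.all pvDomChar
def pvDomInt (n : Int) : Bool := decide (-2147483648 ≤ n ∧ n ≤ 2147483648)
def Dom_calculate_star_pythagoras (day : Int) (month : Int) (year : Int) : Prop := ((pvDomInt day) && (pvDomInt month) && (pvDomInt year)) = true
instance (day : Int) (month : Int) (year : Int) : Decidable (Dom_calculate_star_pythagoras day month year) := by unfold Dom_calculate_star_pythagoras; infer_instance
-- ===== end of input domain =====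

-- B replaces A's while-loop digit-sum reducer with the closed-form digital root 1 + (num-1) % 9 (objective: simpler).

-- ===== PORT A =====
-- int(d) for a one-character string d; exact on digit characters (the only ones reached
-- inside Pre_: the '-' of a negative year, where Python raises ValueError, is excluded by Pre_).
def pvDigitVal (c : Char) : Int := (PySem.Int.ofChars? [c]).getD 0

-- sum(int(d) for d in str(num)) — the digit-sum line both A and B contain verbatim
def pvDigitSum (n : Int) : Int := ((PySem.Int.toChars n).map pvDigitVal).sum

-- termination facts for the while-loop port (cited by pvReduce's decreasing_by)
theorem pvToDigitsCore_eq (f : Nat) : ∀ (n : Nat) (ds : List Char), 0 < n → n ≤ f →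
    Nat.toDigitsCore 10 f n ds = (Nat.digits 10 n).reverse.map Nat.digitChar ++ ds := by
  induction f with
  | zero => intro n ds h hf; omega
  | succ f ih =>
    intro n ds h hf
    rw [Nat.toDigitsCore]
    by_cases h0 : n / 10 = 0
    · rw [if_pos h0]
      rw [Nat.digits_def' (by norm_num : (1:Nat) < 10) h, h0, Nat.digits_zero]
      simp
    · rw [if_neg h0]
      rw [ih (n / 10) _ (by omega) (by omega)]
      rw [Nat.digits_def' (by norm_num : (1:Nat) < 10) h]
      simp

theorem pvDigitVal_digitChar (d : Nat) (h : d < 10) : pvDigitVal (Nat.digitChar d) = (d : Int) := by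
  interval_cases d <;> decide

theorem pvDigitSum_eq (n : Int) (h : 0 ≤ n) : pvDigitSum n = ((Nat.digits 10 n.toNat).sum : Int) := by
  rcases eq_or_lt_of_le h with h0 | hpos
  · rw [← h0]; decide
  · unfold pvDigitSum PySem.Int.toChars
    rw [if_neg (by omega)]
    unfold Nat.toDigits
    rw [pvToDigitsCore_eq _ _ _ (by omega) (by omega)]
    simp only [List.append_nil, List.map_reverse, List.map_map, List.sum_reverse, Function.comp_def]
    rw [List.map_congr_left (fun d hd => pvDigitVal_digitChar d (Nat.digits_lt_base (by norm_num) hd))]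
    rw [Nat.cast_list_sum]

theorem pvDigitsSum_le (m : Nat) : (Nat.digits 10 m).sum ≤ m := by
  induction m using Nat.strong_induction_on with
  | _ m ih =>
    rcases Nat.eq_zero_or_pos m with h | h
    · simp [h]
    · rw [Nat.digits_def' (by norm_num : (1:Nat) < 10) h, List.sum_cons]
      have := ih (m / 10) (by omega)
      omega

theorem pvDigitsSum_lt (m : Nat) (h : 10 ≤ m) : (Nat.digits 10 m).sum < m := by
  rw [Nat.digits_def' (by norm_num : (1:Nat) < 10) (by omega), List.sum_cons]
  have := pvDigitsSum_le (m / 10)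
  omega

theorem pvDigitSum_lt_self (n : Int) (h : 9 < n) : (pvDigitSum n).toNat < n.toNat := by
  rw [pvDigitSum_eq n (by omega)]
  have := pvDigitsSum_lt n.toNat (by omega)
  omega

-- the inner while-loop reducer of A
def pvReduce (num : Int) : Int :=
  if h : 9 < num then pvReduce (pvDigitSum num) else num
termination_by num.toNat
decreasing_by exact pvDigitSum_lt_self num h

def calculate_star_pythagoras (day : Int) (month : Int) (year : Int) : List (String × Int) :=
  let day_number := pvReduce day
  let month_number := pvReduce month
  let year_number := pvReduce (pvDigitSum year)
  let sum1 := pvReduce (day_number + month_number + year_number)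
  let sum2 := pvReduce (day_number + month_number + year_number + sum1)
  let center := pvReduce (day_number + month_number + year_number + sum1 + sum2)
  [("day", day_number), ("month", month_number), ("year", year_number),
   ("sum1", sum1), ("sum2", sum2), ("center", center)]

-- ===== PORT B =====
def pvDigitalRoot (num : Int) : Int := if num ≤ 9 then num else 1 + PySem.Int.mod (num - 1) 9

def calculate_star_pythagoras_alt (day : Int) (month : Int) (year : Int) : List (String × Int) :=
  let day_number := pvDigitalRoot day
  let month_number := pvDigitalRoot month
  let year_number := pvDigitalRoot (pvDigitSum year)
  let base := day_number + month_number + year_number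
  let sum1 := pvDigitalRoot base
  let sum2 := pvDigitalRoot (base + sum1)
  let center := pvDigitalRoot (base + sum1 + sum2)
  [("day", day_number), ("month", month_number), ("year", year_number),
   ("sum1", sum1), ("sum2", sum2), ("center", center)]

-- ===== PRECONDITION & SPEC =====
-- Pre_ excludes year < 0, where str(year) starts with '-' and int('-') raises ValueError in both A and B.
def Pre_calculate_star_pythagoras (day : Int) (month : Int) (year : Int) : Prop := 0 ≤ year
instance (day : Int) (month : Int) (year : Int) : Decidable (Pre_calculate_star_pythagoras day month year) := by unfold Pre_calculate_star_pythagoras; infer_instance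

def pvWitness_calculate_star_pythagoras : Int × Int × Int := (15, 7, 1990)

def Spec_calculate_star_pythagoras (day : Int) (month : Int) (year : Int) (out : List (String × Int)) : Prop := out = calculate_star_pythagoras_alt day month year
instance (day : Int) (month : Int) (year : Int) (out : List (String × Int)) : Decidable (Spec_calculate_star_pythagoras day month year out) := by unfold Spec_calculate_star_pythagoras; infer_instance

-- ===== CLAIM (what is proved, stated in full; the proofs are below) =====
def Claim_equal_calculate_star_pythagoras : Prop := ∀ (day : Int) (month : Int) (year : Int), Dom_calculate_star_pythagoras day month year → Pre_calculate_star_pythagoras day month year → Spec_calculate_star_pythagoras day month year (calculate_star_pythagoras day month year)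

-- ===== LEMMAS AND PROOFS =====
theorem pvDigitsSum_pos (m : Nat) (h : 0 < m) : 0 < (Nat.digits 10 m).sum := by
  induction m using Nat.strong_induction_on with
  | _ m ih =>
    rw [Nat.digits_def' (by norm_num : (1:Nat) < 10) h, List.sum_cons]
    rcases Nat.eq_zero_or_pos (m % 10) with h0 | h0
    · have := ih (m / 10) (by omega) (by omega); omega
    · omega

theorem pvDigitalRoot_of_pos (n : Int) (h : 0 < n) : pvDigitalRoot n = 1 + (n - 1) % 9 := by
  unfold pvDigitalRoot
  split_ifs with h9
  · omega
  · rw [PySem.Int.mod_eq_emod_of_pos (by norm_num)]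

theorem pvReduce_eq_digitalRoot (n : Int) : pvReduce n = pvDigitalRoot n := by
  by_cases h : 9 < n
  · have hS : pvDigitSum n = ((Nat.digits 10 n.toNat).sum : Int) := pvDigitSum_eq n (by omega)
    have hpos : 0 < (Nat.digits 10 n.toNat).sum := pvDigitsSum_pos n.toNat (by omega)
    have ih := pvReduce_eq_digitalRoot (pvDigitSum n)
    rw [pvReduce, dif_pos h, ih]
    rw [pvDigitalRoot_of_pos _ (by omega), pvDigitalRoot_of_pos n (by omega)]
    have hm := (Nat.modEq_digits_sum 9 10 (by norm_num) n.toNat).symm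
    have hmn : (Nat.digits 10 n.toNat).sum % 9 = n.toNat % 9 := hm
    have hm' : ((Nat.digits 10 n.toNat).sum : Int) % 9 = ((n.toNat : Int)) % 9 := by
      exact_mod_cast hmn
    have hn : ((n.toNat : Int)) = n := by omega
    rw [hS]
    omega
  · rw [pvReduce, dif_neg h, pvDigitalRoot, if_pos (by omega)]
termination_by n.toNat
decreasing_by exact pvDigitSum_lt_self n h

-- ===== VERDICT (by name: the statement is the Claim_ definition above) =====
theorem calculate_star_pythagoras_spec : Claim_equal_calculate_star_pythagoras := by
  intro day month year _ _
  unfold Spec_calculate_star_pythagoras calculate_star_pythagoras calculate_star_pythagoras_alt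
  simp only [pvReduce_eq_digitalRoot]
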